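-- pv_equiv track=rewrite | github.com/Uchihadi/Python-Fundamentals | Day 4/encryptsentence.py | encrypt_sentence
-- ===== SOURCE A (Python) =====
-- def encrypt_sentence(sentence):
--     #start writing your code here
--     list_words = sentence.split(" ")
--     count = 1
--     vowels = ["a", "e", "i", "o", "u"]
--     temp = ""
--     word = ""
--
--     encoded = ""
--
--     for word in list_words:
--         cons = ""
--         vol = ""
--         if (count % 2 == 0):
--             for i in word:
--                 if i in vowels:
--                     vol += i
--                 else:
--                     cons += i
--
--             word = cons + vol
--             encoded += word + " "
--
--         else:
--             encoded += word[::-1] + " "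
--
--         count += 1
--     encoded = encoded.strip()
--
--     return encoded
-- ===== SOURCE B (Python) =====
-- def encrypt_sentence(sentence):
--     vowels = ["a", "e", "i", "o", "u"]
--     words = []
--     for idx, word in enumerate(sentence.split(" "), 1):
--         if idx % 2 == 0:
--             # stable sort: consonants (key False) first, vowels (key True) after,
--             # each group keeping its original order
--             words.append("".join(sorted(word, key=lambda c: c in vowels)))
--         else:
--             words.append(word[::-1])
--     return " ".join(words).strip()
-- ===== Notes on version B (the rewrite author's own statement) =====
-- stated objective: idiomatic
-- what changed: Replaces the manual count/accumulator loop and the two-accumulator consonant/vowel partition with enumerate over the words, a stable sort keyed on vowelhood for even positions, and a single ' '.join instead of concatenate-then-strip of a trailing space.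
import Mathlib
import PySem

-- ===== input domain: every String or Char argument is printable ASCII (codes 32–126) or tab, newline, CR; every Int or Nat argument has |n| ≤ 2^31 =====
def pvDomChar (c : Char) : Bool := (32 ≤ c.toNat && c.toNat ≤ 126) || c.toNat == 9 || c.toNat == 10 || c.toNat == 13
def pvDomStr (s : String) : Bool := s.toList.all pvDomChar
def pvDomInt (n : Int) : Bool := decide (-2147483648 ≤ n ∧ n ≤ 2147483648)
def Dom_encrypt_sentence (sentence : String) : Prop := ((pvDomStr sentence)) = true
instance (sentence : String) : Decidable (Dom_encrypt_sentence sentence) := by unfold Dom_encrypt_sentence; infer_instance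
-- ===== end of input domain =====

-- B replaces A's count/two-accumulator loops by enumerate + a stable sort on vowelhood + ' '.join (idiomatic, not faster).


-- ===== PORT A =====
-- 'i in vowels' on the 1-char string i against ["a","e","i","o","u"] is ported as
-- char membership in the corresponding char list — exact.
def pvVowels_a : List Char := ['a', 'e', 'i', 'o', 'u']

def encrypt_sentence (sentence : String) : String :=
  -- sentence.split(" ")
  let list_words := PySem.Chars.splitOn sentence.toList [' ']
  -- count starts at 1; encoded accumulates; the inner loop builds (cons, vol)
  let st := list_words.foldl (fun (st : Int × List Char) word =>
    if st.1 % 2 == 0 then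
      let cv := word.foldl (fun (cv : List Char × List Char) i =>
        if i ∈ pvVowels_a then (cv.1, cv.2 ++ [i]) else (cv.1 ++ [i], cv.2))
        (([] : List Char), ([] : List Char))
      (st.1 + 1, st.2 ++ (cv.1 ++ cv.2) ++ [' '])
    else
      -- word[::-1] is the reverse (exact: PySem.List.slice?_none_none_neg_one)
      (st.1 + 1, st.2 ++ word.reverse ++ [' ']))
    ((1 : Int), ([] : List Char))
  String.ofList (PySem.Chars.strip st.2)

-- ===== PORT B =====
def pvVowels_b : List Char := ['a', 'e', 'i', 'o', 'u']

def encrypt_sentence_alt (sentence : String) : String :=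
  let words := PySem.Chars.splitOn sentence.toList [' ']
  let out := (PySem.List.enumerate words 1).map (fun p =>
    if p.1 % 2 == 0 then
      -- sorted(word, key=lambda c: c in vowels) — stable, False < True
      PySem.List.sorted p.2 (fun c => decide (c ∈ pvVowels_b)) false
    else
      p.2.reverse)
  String.ofList (PySem.Chars.strip (PySem.Chars.join [' '] out))

-- ===== PRECONDITION & SPEC =====
def Spec_encrypt_sentence (sentence : String) (out : String) : Prop := out = encrypt_sentence_alt sentence
instance (sentence : String) (out : String) : Decidable (Spec_encrypt_sentence sentence out) := by unfold Spec_encrypt_sentence; infer_instance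

-- ===== CLAIM (what is proved, stated in full; the proofs are below) =====
def Claim_equal_encrypt_sentence : Prop := ∀ (sentence : String), Dom_encrypt_sentence sentence → Spec_encrypt_sentence sentence (encrypt_sentence sentence)

-- ===== LEMMAS AND PROOFS =====

-- the Bool sort key of B
def pvKey (c : Char) : Bool := decide (c ∈ pvVowels_b)

lemma pv_insert_false (c : Char) (hc : pvKey c = false) :
    ∀ (A B : List Char), (∀ a ∈ A, pvKey a = false) → (∀ b ∈ B, pvKey b = true) →
      PySem.List.insertBy (fun a b => decide (pvKey a < pvKey b)) c (A ++ B) = A ++ c :: B := by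
  intro A
  induction A with
  | nil =>
    intro B _ hB
    cases B with
    | nil => simp [PySem.List.insertBy]
    | cons b B' =>
      have hb : pvKey b = true := hB b (by simp)
      simp [PySem.List.insertBy, hb, hc]
  | cons a A' ih =>
    intro B hA hB
    have ha : pvKey a = false := hA a (by simp)
    have hba : decide (pvKey c < pvKey a) = false := by rw [hc, ha]; decide
    have := ih B (fun x hx => hA x (by simp [hx])) hB
    simp [PySem.List.insertBy, hba, this]

lemma pv_fold_partition :
    ∀ (l A B : List Char), (∀ a ∈ A, pvKey a = false) → (∀ b ∈ B, pvKey b = true) →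
      l.foldl (fun acc x => PySem.List.insertBy (fun a b => decide (pvKey a < pvKey b)) x acc) (A ++ B)
        = (A ++ l.filter (fun c => !pvKey c)) ++ (B ++ l.filter pvKey) := by
  intro l
  induction l with
  | nil => intro A B _ _; simp
  | cons c t ih =>
    intro A B hA hB
    by_cases hc : pvKey c = true
    · have hins : PySem.List.insertBy (fun a b => decide (pvKey a < pvKey b)) c (A ++ B)
          = (A ++ B) ++ [c] := by
        apply PySem.List.insertBy_of_forall_not_before
        intro y _
        rw [hc]; cases h : pvKey y <;> decide
      simp only [List.foldl_cons, hins]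
      have h2 : A ++ B ++ [c] = A ++ (B ++ [c]) := by simp
      rw [h2, ih A (B ++ [c]) hA (by intro b hb; rcases List.mem_append.mp hb with h | h
                                     · exact hB b h
                                     · simp at h; subst h; exact hc)]
      simp [hc]
    · have hc' : pvKey c = false := by simpa using hc
      simp only [List.foldl_cons, pv_insert_false c hc' A B hA hB]
      have : A ++ c :: B = (A ++ [c]) ++ B := by simp
      rw [this, ih (A ++ [c]) B (by intro a ha; rcases List.mem_append.mp ha with h | h
                                    · exact hA a h
                                    · simp at h; subst h; exact hc') hB]
      simp [hc']

lemma pv_sorted_partition (l : List Char) :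
    PySem.List.sorted l pvKey false = l.filter (fun c => !pvKey c) ++ l.filter pvKey := by
  rw [PySem.List.sorted_eq_foldl_insertBy]
  have := pv_fold_partition l [] [] (by simp) (by simp)
  simpa using this

lemma pv_inner_fold :
    ∀ (l c0 v0 : List Char),
      l.foldl (fun (cv : List Char × List Char) i =>
        if i ∈ pvVowels_a then (cv.1, cv.2 ++ [i]) else (cv.1 ++ [i], cv.2)) (c0, v0)
      = (c0 ++ l.filter (fun c => !pvKey c), v0 ++ l.filter pvKey) := by
  intro l
  induction l with
  | nil => intro c0 v0; simp
  | cons c t ih =>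
    intro c0 v0
    by_cases hc : c ∈ pvVowels_a
    · have hk : pvKey c = true := by simp [pvKey, pvVowels_b]; simpa [pvVowels_a] using hc
      simp [hc, ih, hk]
    · have hk : pvKey c = false := by simp [pvKey, pvVowels_b]; simpa [pvVowels_a] using hc
      simp [hc, ih, hk]

-- B's per-word transform followed by a space
def pvPiece (p : Int × List Char) : List Char :=
  (if p.1 % 2 == 0 then PySem.List.sorted p.2 pvKey false else p.2.reverse) ++ [' ']

lemma pv_step_eq (n : Int) (acc word : List Char) :
    (if (n, acc).1 % 2 == 0 then
      let cv := word.foldl (fun (cv : List Char × List Char) i =>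
        if i ∈ pvVowels_a then (cv.1, cv.2 ++ [i]) else (cv.1 ++ [i], cv.2))
        (([] : List Char), ([] : List Char))
      ((n, acc).1 + 1, (n, acc).2 ++ (cv.1 ++ cv.2) ++ [' '])
    else
      ((n, acc).1 + 1, (n, acc).2 ++ word.reverse ++ [' ']))
    = (n + 1, acc ++ pvPiece (n, word)) := by
  by_cases h : n % 2 == 0
  · simp only [h, if_true, pv_inner_fold, pvPiece, List.nil_append]
    simp [pv_sorted_partition]
  · simp only [h, Bool.false_eq_true, if_false, pvPiece]
    simp

lemma pv_main_fold :
    ∀ (ws : List (List Char)) (n : Int) (acc : List Char),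
      (ws.foldl (fun (st : Int × List Char) word =>
        if st.1 % 2 == 0 then
          let cv := word.foldl (fun (cv : List Char × List Char) i =>
            if i ∈ pvVowels_a then (cv.1, cv.2 ++ [i]) else (cv.1 ++ [i], cv.2))
            (([] : List Char), ([] : List Char))
          (st.1 + 1, st.2 ++ (cv.1 ++ cv.2) ++ [' '])
        else
          (st.1 + 1, st.2 ++ word.reverse ++ [' '])) (n, acc)).2
      = acc ++ ((PySem.List.enumerate ws n).map pvPiece).flatten := by
  intro ws
  induction ws with
  | nil => intro n acc; simp [PySem.List.enumerate]
  | cons w t ih =>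
    intro n acc
    rw [List.foldl_cons, pv_step_eq n acc w, ih (n + 1) (acc ++ pvPiece (n, w))]
    simp [PySem.List.enumerate]

lemma pv_rstrip_append_space (l : List Char) :
    PySem.Chars.rstrip (l ++ [' ']) = PySem.Chars.rstrip l := by
  simp [PySem.Chars.rstrip, PySem.Chars.isspace]

lemma pv_strip_append_space (l : List Char) :
    PySem.Chars.strip (l ++ [' ']) = PySem.Chars.strip l := by
  simp only [PySem.Chars.strip, PySem.Chars.lstrip]
  rw [List.dropWhile_append]
  by_cases h : (List.dropWhile PySem.Chars.isspace l).isEmpty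
  · rw [if_pos h]
    have h' : List.dropWhile PySem.Chars.isspace l = [] := by simpa [List.isEmpty_iff] using h
    rw [h']
    simp [PySem.Chars.isspace, PySem.Chars.rstrip]
  · rw [if_neg h]
    exact pv_rstrip_append_space _

lemma pv_flatten_pieces (ts : List (List Char)) :
    PySem.Chars.strip ((ts.map (fun t => t ++ [' '])).flatten)
      = PySem.Chars.strip (PySem.Chars.join [' '] ts) := by
  cases ts with
  | nil => simp [PySem.Chars.join, List.intercalate]
  | cons t ts' =>
    have key : ∀ (rest : List (List Char)) (t : List Char),
        ((t :: rest).map (fun t => t ++ [' '])).flatten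
          = PySem.Chars.join [' '] (t :: rest) ++ [' '] := by
      intro rest
      induction rest with
      | nil => intro t; simp [PySem.Chars.join_singleton]
      | cons u rest' ih =>
        intro t
        have := ih u
        simp only [List.map_cons, List.flatten_cons] at this ⊢
        rw [this, PySem.Chars.join_cons_cons]
        simp
    rw [key ts' t, pv_strip_append_space]

-- ===== VERDICT (by name: the statement is the Claim_ definition above) =====
theorem encrypt_sentence_spec : Claim_equal_encrypt_sentence := by
  intro sentence _
  unfold Spec_encrypt_sentence
  simp only [encrypt_sentence, encrypt_sentence_alt]
  rw [pv_main_fold (PySem.Chars.splitOn sentence.toList [' ']) 1 [], List.nil_append]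
  have hpieces : (PySem.List.enumerate (PySem.Chars.splitOn sentence.toList [' ']) 1).map pvPiece
      = ((PySem.List.enumerate (PySem.Chars.splitOn sentence.toList [' ']) 1).map
          (fun p => if p.1 % 2 == 0 then
              PySem.List.sorted p.2 (fun c => decide (c ∈ pvVowels_b)) false
            else p.2.reverse)).map (fun t => t ++ [' ']) := by
    rw [List.map_map]; rfl
  rw [hpieces, pv_flatten_pieces]
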